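-- pv_equiv track=rewrite | github.com/Albantakis/actual_agency | actual_agency.py | cpr
-- ===== SOURCE A (Python) =====
-- def cpr(string):
--     '''
--     Lempel-Ziv-Welch compression of binary input string, e.g. string='0010101'. It outputs the size of the dictionary of binary words.
--     '''
--     d={}
--     w = ''
--     i=1
--     for c in string:
--         wc = w + c
--         if wc in d:
--             w = wc
--         else:
--             d[wc]=wc
--             w = c
--             i+=1
--     return len(d)
-- ===== SOURCE B (Python) =====
-- def cpr(string):
--     '''
--     LZW dictionary size via an explicit trie (edges in a flat (node,char)->node map)
--     instead of hashing growing w+c strings.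
--     '''
--     children = {}      # (node_id, char) -> child_id; root is node 0
--     marked = set()     # ids of nodes that are dictionary entries
--     nxt = 1            # next fresh node id
--     curr = 0           # node for the current word w (root = empty word)
--     count = 0
--     for c in string:
--         child = children.get((curr, c))
--         if child is not None and child in marked:
--             curr = child
--         else:
--             if child is None:
--                 child = nxt
--                 nxt += 1
--                 children[(curr, c)] = child
--             marked.add(child)
--             count += 1
--             # reset: w = c, i.e. root's child for c (create it unmarked if missing)
--             rc = children.get((0, c))
--             if rc is None:
--                 rc = nxt
--                 nxt += 1
--                 children[(0, c)] = rc
--             curr = rc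
--     return count
-- ===== Notes on version B (the rewrite author's own statement) =====
-- stated objective: alternative
-- what changed: B replaces A's hash dictionary of growing w+c strings by an explicit trie — a flat (node,char)->node edge map plus a set of marked nodes — walking a current-node pointer and counting marks instead of concatenating and hashing whole words.
import Mathlib
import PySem

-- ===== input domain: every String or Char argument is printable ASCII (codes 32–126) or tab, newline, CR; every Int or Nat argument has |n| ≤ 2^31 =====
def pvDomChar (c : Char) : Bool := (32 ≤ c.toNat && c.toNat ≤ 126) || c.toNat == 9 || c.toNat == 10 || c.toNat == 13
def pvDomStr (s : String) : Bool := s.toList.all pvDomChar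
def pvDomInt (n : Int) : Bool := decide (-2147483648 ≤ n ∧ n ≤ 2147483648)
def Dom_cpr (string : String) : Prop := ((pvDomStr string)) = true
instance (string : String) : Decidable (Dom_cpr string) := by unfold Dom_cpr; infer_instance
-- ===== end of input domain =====

-- B replaces A's dictionary of growing w+c strings by an explicit trie (a flat (node,char)→node edge
-- map plus a set of marked nodes), walking a current-node pointer instead of concatenating strings;
-- objective: alternative (same greedy parse, different data structure).

-- ===== PORT A =====
-- A's loop state: (d, w, i); strings are carried as List Char (Python str concatenation = ++).
def cprStep (st : PySem.Dict (List Char) (List Char) × List Char × Int) (c : Char) :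
    PySem.Dict (List Char) (List Char) × List Char × Int :=
  let d := st.1
  let w := st.2.1
  let i := st.2.2
  let wc := w ++ [c]
  if d.contains wc then (d, wc, i) else (d.insert wc wc, [c], i + 1)

def cpr (string : String) : Int :=
  let st := string.toList.foldl cprStep (PySem.Dict.empty, [], 1)
  (st.1.size : Int)

-- ===== PORT B =====
-- B's loop state: (children, marked, nxt, curr, count); root node is 0.
-- the shared miss path: mark `child`, bump the count, reset curr to root's child for c
-- (creating it unmarked if missing) — the trie analogue of A's else-branch.
def cprAltMiss (ch : PySem.Dict (Int × Char) Int) (mk : PySem.Set Int) (nxt cnt child : Int)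
    (c : Char) :
    PySem.Dict (Int × Char) Int × PySem.Set Int × Int × Int × Int :=
  let mk' := mk.add child
  let cnt' := cnt + 1
  match ch.get? (0, c) with
  | some rc => (ch, mk', nxt, rc, cnt')
  | none => (ch.insert (0, c) nxt, mk', nxt + 1, nxt, cnt')

def cprAltStep (st : PySem.Dict (Int × Char) Int × PySem.Set Int × Int × Int × Int) (c : Char) :
    PySem.Dict (Int × Char) Int × PySem.Set Int × Int × Int × Int :=
  let ch := st.1
  let mk := st.2.1
  let nxt := st.2.2.1
  let curr := st.2.2.2.1
  let cnt := st.2.2.2.2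
  match ch.get? (curr, c) with
  | some child =>
      if mk.contains child then (ch, mk, nxt, child, cnt)
      else cprAltMiss ch mk nxt cnt child c
  | none => cprAltMiss (ch.insert (curr, c) nxt) mk (nxt + 1) cnt nxt c

def cpr_alt (string : String) : Int :=
  (string.toList.foldl cprAltStep (PySem.Dict.empty, PySem.Set.empty, 1, 0, 0)).2.2.2.2

-- ===== PRECONDITION & SPEC =====
def Spec_cpr (string : String) (out : Int) : Prop := out = cpr_alt string
instance (string : String) (out : Int) : Decidable (Spec_cpr string out) := by unfold Spec_cpr; infer_instance

-- ===== CLAIM (what is proved, stated in full; the proofs are below) =====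
def Claim_equal_cpr : Prop := ∀ (string : String), Dom_cpr string → Spec_cpr string (cpr string)

-- ===== LEMMAS AND PROOFS =====

-- ι is the (ghost) allocation table: node id ↦ the word it spells from the root.
-- EdgeInv: the pure trie part — root exists, ids are fresh below nxt, ι is a bijection,
-- the edge map realises exactly the one-char extensions in ι, and ι is prefix-closed.
def EdgeInv (ch : PySem.Dict (Int × Char) Int) (nxt : Int) (ι : List (Int × List Char)) : Prop :=
  ((0, ([] : List Char)) ∈ ι)
  ∧ (∀ v p, (v, p) ∈ ι → v < nxt)
  ∧ (∀ v p u q, (v, p) ∈ ι → (u, q) ∈ ι → (v = u ↔ p = q))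
  ∧ (∀ u c v, ch.get? (u, c) = some v ↔ ∃ p, (u, p) ∈ ι ∧ (v, p ++ [c]) ∈ ι)
  ∧ (∀ v p c', (v, p ++ [c']) ∈ ι → ∃ u, (u, p) ∈ ι)

-- Full simulation relation between A's state (d, w) and B's state (ch, mk, nxt, curr, cnt).
def TrieInv (d : PySem.Dict (List Char) (List Char)) (w : List Char)
    (ch : PySem.Dict (Int × Char) Int) (mk : PySem.Set Int) (nxt curr cnt : Int)
    (ι : List (Int × List Char)) : Prop :=
  EdgeInv ch nxt ι
  ∧ ((curr, w) ∈ ι)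
  ∧ (∀ p, d.contains p = true ↔ ∃ v, (v, p) ∈ ι ∧ v ∈ mk)
  ∧ (cnt = (d.size : Int))
  ∧ (∀ v ∈ mk, v < nxt)

def StInv (sa : PySem.Dict (List Char) (List Char) × List Char × Int)
    (sb : PySem.Dict (Int × Char) Int × PySem.Set Int × Int × Int × Int) : Prop :=
  ∃ ι, TrieInv sa.1 sa.2.1 sb.1 sb.2.1 sb.2.2.1 sb.2.2.2.1 sb.2.2.2.2 ι

-- allocating a fresh node nxt as the c-child of an existing node preserves EdgeInv
lemma extend_edgeInv {ch : PySem.Dict (Int × Char) Int} {nxt : Int}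
    {ι : List (Int × List Char)} {parent : Int} {pp : List Char} {c : Char}
    (h : EdgeInv ch nxt ι) (hparent : (parent, pp) ∈ ι)
    (hfresh : ∀ v, (v, pp ++ [c]) ∉ ι) :
    EdgeInv (ch.insert (parent, c) nxt) (nxt + 1) ((nxt, pp ++ [c]) :: ι) := by
  obtain ⟨hroot, hbound, hinj, hedge, hpar⟩ := h
  have hnxtfresh : ∀ p, (nxt, p) ∉ ι := fun p hp => absurd (hbound _ _ hp) (lt_irrefl nxt)
  refine ⟨List.mem_cons_of_mem _ hroot, ?_, ?_, ?_, ?_⟩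
  · intro v p hv
    rcases List.mem_cons.mp hv with h' | h'
    · injection h' with ha _; omega
    · have := hbound _ _ h'; omega
  · intro v p u q hv hu
    rcases List.mem_cons.mp hv with h1 | h1 <;> rcases List.mem_cons.mp hu with h2 | h2
    · injection h1 with ha hb; injection h2 with hc hd
      subst ha; subst hb; subst hc; subst hd; simp
    · injection h1 with ha hb
      subst ha; subst hb
      constructor
      · intro hv'; rw [← hv'] at h2; exact absurd h2 (hnxtfresh _)
      · intro hp'; rw [← hp'] at h2; exact absurd h2 (hfresh _)
    · injection h2 with ha hb
      subst ha; subst hb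
      constructor
      · intro hv'; rw [hv'] at h1; exact absurd h1 (hnxtfresh _)
      · intro hp'; rw [hp'] at h1; exact absurd h1 (hfresh _)
    · exact hinj _ _ _ _ h1 h2
  · intro u c₂ v
    rw [PySem.Dict.get?_insert]
    by_cases hk : (u, c₂) = (parent, c)
    · injection hk with hu hc
      subst hu; subst hc
      rw [if_pos rfl]
      simp only [Option.some.injEq]
      constructor
      · intro hv; subst hv; exact ⟨pp, List.mem_cons_of_mem _ hparent, List.mem_cons_self ..⟩
      · rintro ⟨p, hp, hvp⟩
        rcases List.mem_cons.mp hp with h1 | h1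
        · -- the parent would be the fresh node: impossible since it is already allocated
          injection h1 with ha _
          exact absurd (ha ▸ hparent) (hnxtfresh pp)
        · have hpe : p = pp := (hinj _ _ _ _ h1 hparent).mp rfl
          subst hpe
          rcases List.mem_cons.mp hvp with h2 | h2
          · injection h2 with h2a _; exact h2a.symm
          · exact absurd h2 (hfresh _)
    · rw [if_neg hk]
      constructor
      · intro hv
        obtain ⟨p, hp, hvp⟩ := (hedge u c₂ v).mp hv
        exact ⟨p, List.mem_cons_of_mem _ hp, List.mem_cons_of_mem _ hvp⟩
      · rintro ⟨p, hp, hvp⟩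
        rcases List.mem_cons.mp hp with h1 | h1
        · -- u is the fresh node: its child (pp++[c])++[c₂] cannot exist yet
          injection h1 with ha hb
          subst hb
          rcases List.mem_cons.mp hvp with h2 | h2
          · injection h2 with _ h2b
            simp at h2b
          · obtain ⟨u', hu'⟩ := hpar _ _ _ h2
            exact absurd hu' (hfresh _)
        · rcases List.mem_cons.mp hvp with h2 | h2
          · injection h2 with _ h2b
            obtain ⟨hpp, hcc⟩ := List.append_inj' h2b rfl
            have hcc' : c₂ = c := by simpa using hcc
            subst hpp
            have : u = parent := (hinj _ _ _ _ h1 hparent).mpr rfl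
            subst this; subst hcc'
            exact absurd rfl hk
          · exact (hedge u c₂ v).mpr ⟨p, h1, h2⟩
  · intro v p c' hv
    rcases List.mem_cons.mp hv with h1 | h1
    · injection h1 with _ hb
      obtain ⟨hpp, _⟩ := List.append_inj' hb rfl
      subst hpp
      exact ⟨parent, List.mem_cons_of_mem _ hparent⟩
    · obtain ⟨u, hu⟩ := hpar _ _ _ h1
      exact ⟨u, List.mem_cons_of_mem _ hu⟩

-- the shared miss path: A inserts wc and resets w to [c]; B marks `child` and resets curr
lemma miss_inv {d : PySem.Dict (List Char) (List Char)} {w : List Char}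
    {ch : PySem.Dict (Int × Char) Int} {mk : PySem.Set Int} {nxt cnt child : Int} {c : Char}
    {ι : List (Int × List Char)}
    (he : EdgeInv ch nxt ι)
    (hdict : ∀ p, d.contains p = true ↔ ∃ v, (v, p) ∈ ι ∧ v ∈ mk)
    (hcnt : cnt = (d.size : Int))
    (hmk : ∀ v ∈ mk, v < nxt)
    (hchild : (child, w ++ [c]) ∈ ι)
    (hnew : d.contains (w ++ [c]) = false) :
    StInv (d.insert (w ++ [c]) (w ++ [c]), [c], 0) (cprAltMiss ch mk nxt cnt child c) := by
  obtain ⟨hroot, hbound, hinj, hedge, hpar⟩ := he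
  have hchildlt : child < nxt := hbound _ _ hchild
  have hsize : ((d.insert (w ++ [c]) (w ++ [c])).size : Int) = (d.size : Int) + 1 := by
    rw [PySem.Dict.size_insert, if_neg (by simp [hnew])]; push_cast; ring
  have hcontains' : ∀ p, (d.insert (w ++ [c]) (w ++ [c])).contains p = true ↔
      p = w ++ [c] ∨ d.contains p = true := by
    intro p
    rw [PySem.Dict.contains_insert]
    simp
  cases hrc : ch.get? (0, c) with
  | some rc =>
      have hB : cprAltMiss ch mk nxt cnt child c = (ch, mk.add child, nxt, rc, cnt + 1) := by
        simp [cprAltMiss, hrc]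
      rw [hB]
      have hrcp : (rc, [c]) ∈ ι := by
        obtain ⟨p, hp, hvp⟩ := (hedge 0 c rc).mp hrc
        have : p = [] := (hinj _ _ _ _ hp hroot).mp rfl
        subst this
        simpa using hvp
      refine ⟨ι, ⟨hroot, hbound, hinj, hedge, hpar⟩, hrcp, ?_, ?_, ?_⟩
      · intro p
        rw [hcontains' p]
        constructor
        · rintro (h1 | h1)
          · subst h1; exact ⟨child, hchild, (PySem.Set.mem_add mk child child).mpr (Or.inr rfl)⟩
          · obtain ⟨v, hv, hvm⟩ := (hdict p).mp h1
            exact ⟨v, hv, (PySem.Set.mem_add mk child v).mpr (Or.inl hvm)⟩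
        · rintro ⟨v, hv, hvm⟩
          rcases (PySem.Set.mem_add mk child v).mp hvm with h1 | h1
          · exact Or.inr ((hdict p).mpr ⟨v, hv, h1⟩)
          · subst h1
            exact Or.inl ((hinj _ _ _ _ hv hchild).mp rfl)
      · show cnt + 1 = _
        rw [hsize, hcnt]
      · intro v hv
        rcases (PySem.Set.mem_add mk child v).mp hv with h1 | h1
        · exact hmk v h1
        · subst h1; exact hchildlt
  | none =>
      have hB : cprAltMiss ch mk nxt cnt child c
          = (ch.insert (0, c) nxt, mk.add child, nxt + 1, nxt, cnt + 1) := by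
        simp [cprAltMiss, hrc]
      rw [hB]
      have hcfresh : ∀ v, (v, ([] : List Char) ++ [c]) ∉ ι := by
        intro v hv
        have := (hedge 0 c v).mpr ⟨[], hroot, hv⟩
        rw [hrc] at this
        simp at this
      have he' := extend_edgeInv ⟨hroot, hbound, hinj, hedge, hpar⟩ hroot hcfresh
      refine ⟨(nxt, ([] : List Char) ++ [c]) :: ι, he', ?_, ?_, ?_, ?_⟩
      · simp
      · intro p
        rw [hcontains' p]
        constructor
        · rintro (h1 | h1)
          · subst h1
            exact ⟨child, List.mem_cons_of_mem _ hchild,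
              (PySem.Set.mem_add mk child child).mpr (Or.inr rfl)⟩
          · obtain ⟨v, hv, hvm⟩ := (hdict p).mp h1
            exact ⟨v, List.mem_cons_of_mem _ hv,
              (PySem.Set.mem_add mk child v).mpr (Or.inl hvm)⟩
        · rintro ⟨v, hv, hvm⟩
          rcases List.mem_cons.mp hv with h1 | h1
          · -- the fresh reset node is unmarked
            injection h1 with ha _
            rcases (PySem.Set.mem_add mk child v).mp hvm with h2 | h2
            · exact absurd (hmk _ h2) (by omega)
            · exact absurd hchildlt (by omega)
          · rcases (PySem.Set.mem_add mk child v).mp hvm with h2 | h2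
            · exact Or.inr ((hdict p).mpr ⟨v, h1, h2⟩)
            · subst h2
              exact Or.inl ((hinj _ _ _ _ h1 hchild).mp rfl)
      · show cnt + 1 = _
        rw [hsize, hcnt]
      · intro v hv
        show v < nxt + 1
        rcases (PySem.Set.mem_add mk child v).mp hv with h1 | h1
        · have := hmk v h1; omega
        · subst h1; omega

lemma step_inv (c : Char)
    (sa : PySem.Dict (List Char) (List Char) × List Char × Int)
    (sb : PySem.Dict (Int × Char) Int × PySem.Set Int × Int × Int × Int)
    (h : StInv sa sb) : StInv (cprStep sa c) (cprAltStep sb c) := by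
  obtain ⟨d, w, i⟩ := sa
  obtain ⟨ch, mk, nxt, curr, cnt⟩ := sb
  obtain ⟨ι, he, hcurr, hdict, hcnt, hmk⟩ := h
  dsimp only at he hcurr hdict hcnt hmk
  obtain ⟨hroot, hbound, hinj, hedge, hpar⟩ := he
  have hASome : ∀ v, ch.get? (curr, c) = some v → (v, w ++ [c]) ∈ ι := by
    intro v hv
    obtain ⟨p, hp, hvp⟩ := (hedge curr c v).mp hv
    have : p = w := (hinj _ _ _ _ hp hcurr).mp rfl
    subst this; exact hvp
  by_cases hd : d.contains (w ++ [c]) = true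
  · -- hit: A extends w; B follows the marked child
    obtain ⟨v, hv, hvm⟩ := (hdict _).mp hd
    have hgv : ch.get? (curr, c) = some v := (hedge curr c v).mpr ⟨w, hcurr, hv⟩
    have hcv : mk.contains v = true := by simpa [PySem.Set.contains] using hvm
    have hstepA : cprStep (d, w, i) c = (d, w ++ [c], i) := by
      simp [cprStep, hd]
    have hstepB : cprAltStep (ch, mk, nxt, curr, cnt) c = (ch, mk, nxt, v, cnt) := by
      simp [cprAltStep, hgv]
      intro hx
      exact absurd hvm hx
    rw [hstepA, hstepB]
    exact ⟨ι, ⟨hroot, hbound, hinj, hedge, hpar⟩, hv, hdict, hcnt, hmk⟩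
  · -- miss: A inserts wc and resets; B marks the child (allocating it if absent) and resets
    have hd' : d.contains (w ++ [c]) = false := by simpa using hd
    have hstepA : cprStep (d, w, i) c = (d.insert (w ++ [c]) (w ++ [c]), [c], i + 1) := by
      simp [cprStep, hd']
    rw [hstepA]
    cases hch : ch.get? (curr, c) with
    | some child =>
        have hchild : (child, w ++ [c]) ∈ ι := hASome child hch
        have hnm : mk.contains child = false := by
          by_contra hx
          have hx' : child ∈ mk := by
            simpa [PySem.Set.contains] using (eq_true_of_ne_false hx)
          exact absurd ((hdict _).mpr ⟨child, hchild, hx'⟩) (by simp [hd'])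
        have hnm' : child ∉ mk := by
          intro hx
          rw [show mk.contains child = true by simpa [PySem.Set.contains] using hx] at hnm
          simp at hnm
        have hstepB : cprAltStep (ch, mk, nxt, curr, cnt) c = cprAltMiss ch mk nxt cnt child c := by
          simp [cprAltStep, hch]
          intro hx
          exact absurd hx hnm'
        rw [hstepB]
        obtain ⟨ι', hι'⟩ :=
          miss_inv (d := d) (w := w) ⟨hroot, hbound, hinj, hedge, hpar⟩ hdict hcnt hmk hchild hd'
        exact ⟨ι', hι'⟩
    | none =>
        have hwcfresh : ∀ v, (v, w ++ [c]) ∉ ι := by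
          intro v hv
          have := (hedge curr c v).mpr ⟨w, hcurr, hv⟩
          rw [hch] at this
          simp at this
        have hstepB : cprAltStep (ch, mk, nxt, curr, cnt) c
            = cprAltMiss (ch.insert (curr, c) nxt) mk (nxt + 1) cnt nxt c := by
          simp [cprAltStep, hch]
        rw [hstepB]
        have he' := extend_edgeInv ⟨hroot, hbound, hinj, hedge, hpar⟩ hcurr hwcfresh
        have hchild' : (nxt, w ++ [c]) ∈ (nxt, w ++ [c]) :: ι := List.mem_cons_self ..
        have hdict' : ∀ p, d.contains p = true ↔
            ∃ v, (v, p) ∈ (nxt, w ++ [c]) :: ι ∧ v ∈ mk := by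
          intro p
          rw [hdict p]
          constructor
          · rintro ⟨v, hv, hvm⟩
            exact ⟨v, List.mem_cons_of_mem _ hv, hvm⟩
          · rintro ⟨v, hv, hvm⟩
            rcases List.mem_cons.mp hv with h1 | h1
            · injection h1 with ha _
              subst ha
              exact absurd (hmk _ hvm) (by omega)
            · exact ⟨v, h1, hvm⟩
        have hmk' : ∀ v ∈ mk, v < nxt + 1 := fun v hv => by have := hmk v hv; omega
        obtain ⟨ι', hι'⟩ := miss_inv (d := d) (w := w) he' hdict' hcnt hmk' hchild' hd'
        exact ⟨ι', hι'⟩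

lemma fold_inv (cs : List Char) :
    ∀ sa sb, StInv sa sb → StInv (cs.foldl cprStep sa) (cs.foldl cprAltStep sb) := by
  induction cs with
  | nil => intro sa sb h; exact h
  | cons c cs ih =>
      intro sa sb h
      exact ih _ _ (step_inv c sa sb h)

-- ===== VERDICT (by name: the statement is the Claim_ definition above) =====
theorem cpr_spec : Claim_equal_cpr := by
  intro string _
  unfold Spec_cpr cpr cpr_alt
  have hinit : TrieInv PySem.Dict.empty [] PySem.Dict.empty PySem.Set.empty 1 0 0
      [(0, ([] : List Char))] := by
    refine ⟨⟨by simp, ?_, ?_, ?_, ?_⟩, by simp, ?_, by simp [PySem.Dict.size], ?_⟩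
    · intro v p hv; simp at hv; omega
    · intro v p u q hv hu; simp at hv hu
      obtain ⟨hv1, hv2⟩ := hv; obtain ⟨hu1, hu2⟩ := hu
      subst hv1; subst hv2; subst hu1; subst hu2; simp
    · intro u c v
      constructor
      · intro h; rw [PySem.Dict.get?_empty] at h; simp at h
      · rintro ⟨p, hp, hvp⟩
        simp at hvp
    · intro v p c' hv
      simp at hv
    · intro p
      constructor
      · intro h; rw [PySem.Dict.contains_empty] at h; simp at h
      · rintro ⟨v, _, hvm⟩
        simp [PySem.Set.empty] at hvm
    · intro v hv; simp [PySem.Set.empty] at hv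
  obtain ⟨ι, _, _, _, hcnt, _⟩ := fold_inv string.toList (PySem.Dict.empty, [], 1)
    (PySem.Dict.empty, PySem.Set.empty, 1, 0, 0) ⟨[(0, ([] : List Char))], hinit⟩
  exact hcnt.symm
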